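-- pv_equiv track=rewrite | github.com/TalonT-Org/AutoSkillit | tests/contracts/test_sous_chef_routing.py | _extract_routing_section
-- ===== SOURCE A (Python) =====
-- def _extract_routing_section(skill_md: str) -> str:
--     """Extract the full CONTEXT LIMIT ROUTING section."""
--     lines = skill_md.splitlines()
--     in_section = False
--     extracted: list[str] = []
--     for line in lines:
--         if "CONTEXT LIMIT ROUTING" in line:
--             in_section = True
--             extracted.append(line)
--             continue
--         if in_section and line.startswith("---"):
--             break
--         if in_section:
--             extracted.append(line)
--     return "\n".join(extracted)
-- ===== SOURCE B (Python) =====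
-- def _extract_routing_section(skill_md: str) -> str:
--     lines = skill_md.splitlines()
--     start = next((i for i, l in enumerate(lines) if "CONTEXT LIMIT ROUTING" in l), None)
--     if start is None:
--         return ""
--     end = next((j for j in range(start + 1, len(lines)) if lines[j].startswith("---")),
--                len(lines))
--     return "\n".join(lines[start:end])
-- ===== Notes on version B (the rewrite author's own statement) =====
-- stated objective: simpler
-- what changed: Replaced the stateful in_section flag loop with explicit boundary indices (first marker line, then first '---' line after it) and a single slice; Pre_ excludes inputs where a '---' line after the first marker line itself contains the marker, a degenerate corner where A re-enters the section while B reads it as the terminator and either reading is defensible.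
import Mathlib
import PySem

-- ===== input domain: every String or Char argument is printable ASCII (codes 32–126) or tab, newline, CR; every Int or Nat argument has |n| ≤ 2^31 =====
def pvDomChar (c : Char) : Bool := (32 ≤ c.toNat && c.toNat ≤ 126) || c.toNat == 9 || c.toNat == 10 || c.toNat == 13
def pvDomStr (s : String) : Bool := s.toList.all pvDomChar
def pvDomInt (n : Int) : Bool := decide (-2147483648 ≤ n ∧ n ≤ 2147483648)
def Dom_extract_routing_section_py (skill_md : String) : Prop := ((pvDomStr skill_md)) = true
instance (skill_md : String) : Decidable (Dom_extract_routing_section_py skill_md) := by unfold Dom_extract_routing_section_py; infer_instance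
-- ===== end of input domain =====

-- B replaces A's stateful in_section flag loop by explicit boundary indices (first
-- marker line, first '---' line after it) and a slice; same cost, simpler decomposition.

-- ===== PORT A =====
-- the for-loop of A: state = (in_section, extracted); 'break' returns the accumulator
def pvLoopA : List String → Bool → List String → List String
  | [], _, extracted => extracted
  | l :: ls, inSection, extracted =>
    if PySem.Str.isIn "CONTEXT LIMIT ROUTING" l then
      pvLoopA ls true (extracted ++ [l])
    else if inSection && PySem.Str.startswith l "---" then
      extracted
    else if inSection then
      pvLoopA ls inSection (extracted ++ [l])
    else
      pvLoopA ls inSection extracted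

def extract_routing_section_py (skill_md : String) : String :=
  let lines := PySem.Str.splitlines skill_md
  PySem.Str.join "\n" (pvLoopA lines false [])

-- ===== PORT B =====
-- B's terminator test: the line starts with "---"
def pvIsStop (l : String) : Bool := PySem.Str.startswith l "---"

-- B's 'next(j for j in range(start+1, len(lines)) if …)' scan, default len(lines)
def pvFindEnd : List String → Nat → Nat
  | [], j => j
  | l :: ls, j => if pvIsStop l then j else pvFindEnd ls (j + 1)

def extract_routing_section_py_alt (skill_md : String) : String :=
  let lines := PySem.Str.splitlines skill_md
  match lines.findIdx? (fun l => PySem.Str.isIn "CONTEXT LIMIT ROUTING" l) with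
  | none => ""
  | some start =>
    let e := pvFindEnd (lines.drop (start + 1)) (start + 1)
    PySem.Str.join "\n" ((lines.drop start).take (e - start))

-- ===== PRECONDITION & SPEC =====
-- Pre_ excludes inputs where some line after the first marker-containing line both
-- starts with "---" and itself contains the marker: on that degenerate corner A
-- re-enters the section at the "---" line while B reads it as the terminator, and
-- either reading of such a line is defensible.
def pvCleanTail (skill_md : String) : Bool :=
  match (PySem.Str.splitlines skill_md).findIdx?
      (fun l => PySem.Str.isIn "CONTEXT LIMIT ROUTING" l) with
  | none => true
  | some i =>
    ((PySem.Str.splitlines skill_md).drop (i + 1)).all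
      (fun l => !(PySem.Str.startswith l "---" && PySem.Str.isIn "CONTEXT LIMIT ROUTING" l))

def Pre_extract_routing_section_py (skill_md : String) : Prop := pvCleanTail skill_md = true
instance (skill_md : String) : Decidable (Pre_extract_routing_section_py skill_md) := by
  unfold Pre_extract_routing_section_py; infer_instance

def pvWitness_extract_routing_section_py : String := "a\nCONTEXT LIMIT ROUTING\nx\n---\nz"

def Spec_extract_routing_section_py (skill_md : String) (out : String) : Prop := out = extract_routing_section_py_alt skill_md
instance (skill_md : String) (out : String) : Decidable (Spec_extract_routing_section_py skill_md out) := by unfold Spec_extract_routing_section_py; infer_instance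

-- ===== CLAIM (what is proved, stated in full; the proofs are below) =====
def Claim_equal_extract_routing_section_py : Prop := ∀ (skill_md : String), Dom_extract_routing_section_py skill_md → Pre_extract_routing_section_py skill_md → Spec_extract_routing_section_py skill_md (extract_routing_section_py skill_md)

-- ===== LEMMAS AND PROOFS =====

-- A's break condition while in the section (marker-check comes first, so a marker
-- line is never a break)
def pvIsStopA (l : String) : Bool :=
  PySem.Str.startswith l "---" && !PySem.Str.isIn "CONTEXT LIMIT ROUTING" l

-- once inside the section, A keeps every line until the first A-stop line
theorem pvLoopA_true (ls : List String) (acc : List String) :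
    pvLoopA ls true acc = acc ++ ls.takeWhile (fun l => !pvIsStopA l) := by
  induction ls generalizing acc with
  | nil => simp [pvLoopA]
  | cons l ls ih =>
    by_cases hm : PySem.Str.isIn "CONTEXT LIMIT ROUTING" l = true
    · simp at hm
      simp [pvLoopA, hm, pvIsStopA, ih]
    · by_cases hs : PySem.Str.startswith l "---" = true
      · simp at hm
        simp at hs
        simp [pvLoopA, hm, hs, pvIsStopA]
      · simp at hm
        simp at hs
        simp [pvLoopA, hm, hs, pvIsStopA, ih]

theorem pvFindEnd_eq (ls : List String) (j : Nat) :
    pvFindEnd ls j = j + (ls.takeWhile (fun l => !pvIsStop l)).length := by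
  induction ls generalizing j with
  | nil => simp [pvFindEnd]
  | cons l ls ih =>
    by_cases h : pvIsStop l = true
    · simp [pvFindEnd, h]
    · simp [pvFindEnd, h, ih]
      omega

theorem pvTake_takeWhile {α : Type} (p : α → Bool) (ls : List α) :
    ls.take (ls.takeWhile p).length = ls.takeWhile p := by
  induction ls with
  | nil => simp
  | cons l ls ih =>
    by_cases h : p l = true
    · simp [h, ih]
    · simp [h]

-- on a tail with no "---"-and-marker line, A's and B's stop tests agree
theorem pvTakeWhile_congr (ls : List String)
    (h : ∀ l ∈ ls, ¬ (PySem.Str.startswith l "---" = true ∧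
        PySem.Str.isIn "CONTEXT LIMIT ROUTING" l = true)) :
    ls.takeWhile (fun l => !pvIsStopA l) = ls.takeWhile (fun l => !pvIsStop l) := by
  induction ls with
  | nil => rfl
  | cons l ls ih =>
    have hl := h l (by simp)
    have ht : ∀ l' ∈ ls, ¬ (PySem.Str.startswith l' "---" = true ∧
        PySem.Str.isIn "CONTEXT LIMIT ROUTING" l' = true) :=
      fun l' hm => h l' (by simp [hm])
    have heq : (!pvIsStopA l) = (!pvIsStop l) := by
      simp only [pvIsStopA, pvIsStop]
      by_cases hs : PySem.Str.startswith l "---" = true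
      · have hc : PySem.Str.isIn "CONTEXT LIMIT ROUTING" l = false := by
          by_contra hcc
          exact hl ⟨hs, by simpa using hcc⟩
        rw [hs, hc]
        decide
      · rw [Bool.not_eq_true] at hs
        rw [hs]
        simp
    simp only [List.takeWhile_cons, heq]
    by_cases hb : pvIsStop l = true
    · simp [hb]
    · simp at hb; simp [hb, ih ht]

-- list-level equivalence of the two strategies on pre-clean inputs
theorem pvMain (lines : List String)
    (hpre : ∀ i, lines.findIdx? (fun l => PySem.Str.isIn "CONTEXT LIMIT ROUTING" l) = some i →
      ∀ l ∈ lines.drop (i + 1), ¬ (PySem.Str.startswith l "---" = true ∧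
        PySem.Str.isIn "CONTEXT LIMIT ROUTING" l = true)) :
    PySem.Str.join "\n" (pvLoopA lines false []) =
    (match lines.findIdx? (fun l => PySem.Str.isIn "CONTEXT LIMIT ROUTING" l) with
     | none => ""
     | some start =>
       PySem.Str.join "\n"
         ((lines.drop start).take (pvFindEnd (lines.drop (start + 1)) (start + 1) - start))) := by
  induction lines with
  | nil => simp [pvLoopA, PySem.Str.join]
  | cons l ls ih =>
    by_cases hm : PySem.Str.isIn "CONTEXT LIMIT ROUTING" l = true
    · have hclean := hpre 0 (by rw [List.findIdx?_cons, if_pos hm])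
      simp only [List.drop_succ_cons, List.drop_zero] at hclean
      simp only [pvLoopA, if_true, List.findIdx?_cons, hm]
      simp only [List.drop_succ_cons, List.drop_zero]
      rw [pvLoopA_true, pvFindEnd_eq, pvTakeWhile_congr ls hclean]
      have : (1 + (ls.takeWhile (fun l => !pvIsStop l)).length - 0) =
          (ls.takeWhile (fun l => !pvIsStop l)).length + 1 := by omega
      simp [this, List.take_succ_cons, pvTake_takeWhile]
    · have hpre' : ∀ i, ls.findIdx? (fun l => PySem.Str.isIn "CONTEXT LIMIT ROUTING" l) = some i →
          ∀ l' ∈ ls.drop (i + 1), ¬ (PySem.Str.startswith l' "---" = true ∧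
            PySem.Str.isIn "CONTEXT LIMIT ROUTING" l' = true) := by
        intro i hfi l' hl'
        have : (l :: ls).findIdx? (fun l => PySem.Str.isIn "CONTEXT LIMIT ROUTING" l) =
            some (i + 1) := by
          rw [Bool.not_eq_true] at hm
          rw [List.findIdx?_cons, if_neg (by intro hcc; rw [hm] at hcc; exact Bool.false_ne_true hcc), hfi]
          rfl
        exact hpre (i + 1) this l' (by simpa using hl')
      simp only [pvLoopA, if_false, Bool.false_and, if_false, List.findIdx?_cons, hm,
        Bool.false_eq_true]
      rw [ih hpre']
      cases hfi : ls.findIdx? (fun l => PySem.Str.isIn "CONTEXT LIMIT ROUTING" l) with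
      | none => simp
      | some i =>
        simp only [Option.map_some, List.drop_succ_cons]
        rw [pvFindEnd_eq, pvFindEnd_eq]
        have h1 : i + 1 + 1 = i + 2 := by omega
        have h2 : ∀ n : Nat, i + 1 + n - i = i + 2 + n - (i + 1) := by omega
        rw [h1, h2]

-- ===== VERDICT (by name: the statement is the Claim_ definition above) =====
theorem extract_routing_section_py_spec : Claim_equal_extract_routing_section_py := by
  intro skill_md _ hpre
  unfold Spec_extract_routing_section_py extract_routing_section_py extract_routing_section_py_alt
  apply pvMain (PySem.Str.splitlines skill_md)
  intro i hfi l hl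
  unfold Pre_extract_routing_section_py pvCleanTail at hpre
  rw [hfi] at hpre
  rw [List.all_eq_true] at hpre
  have hthis := hpre l hl
  intro ⟨h1, h2⟩
  rw [h1, h2] at hthis
  exact absurd hthis (by decide)
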